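-- pv_equiv track=rewrite | github.com/alenbob/studio-quantikz | quantikz_statevector_evolution.py | apply_swap
-- ===== SOURCE A (Python) =====
-- def bit_mask(num_qubits: int, qubit: int) -> int:
--     return 1 << (num_qubits - 1 - qubit)
--
-- def bit_value(state: int, num_qubits: int, qubit: int) -> int:
--     return 1 if state & bit_mask(num_qubits, qubit) else 0
--
-- def controls_match(state: int, num_qubits: int, controls: list[tuple[int, str]]) -> bool:
--     for qubit, control_state in controls:
--         expected = 1 if control_state == "1" else 0
--         if bit_value(state, num_qubits, qubit) != expected:
--             return False
--     return True
--
-- def apply_swap(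
--     terms: dict[int, str],
--     num_qubits: int,
--     left: int,
--     right: int,
--     controls: list[tuple[int, str]] | None = None,
-- ) -> dict[int, str]:
--     controls = controls or []
--     result: dict[int, str] = {}
--     left_mask = bit_mask(num_qubits, left)
--     right_mask = bit_mask(num_qubits, right)
--     for state, amplitude in terms.items():
--         if not controls_match(state, num_qubits, controls):
--             result[state] = amplitude
--             continue
--         left_bit = 1 if state & left_mask else 0
--         right_bit = 1 if state & right_mask else 0
--         swapped_state = state
--         if left_bit != right_bit:
--             swapped_state ^= left_mask
--             swapped_state ^= right_mask
--         result[swapped_state] = amplitude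
--     return result
-- ===== SOURCE B (Python) =====
-- def apply_swap(
--     terms,
--     num_qubits,
--     left,
--     right,
--     controls=None,
-- ):
--     left_mask = 1 << (num_qubits - 1 - left)
--     right_mask = 1 << (num_qubits - 1 - right)
--     control_mask = 0
--     control_value = 0
--     conflict = False
--     for qubit, control_state in (controls or []):
--         m = 1 << (num_qubits - 1 - qubit)
--         v = m if control_state == "1" else 0
--         if control_mask & m and (control_value & m) != v:
--             conflict = True
--         control_mask |= m
--         control_value |= v
--     result = {}
--     for state, amplitude in terms.items():
--         new_state = state
--         if not conflict and (state & control_mask) == control_value: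
--             if bool(state & left_mask) != bool(state & right_mask):
--                 new_state = state ^ left_mask ^ right_mask
--         result[new_state] = amplitude
--     return result
-- ===== Notes on version B (the rewrite author's own statement) =====
-- stated objective: alternative
-- what changed: Replaces the per-term inner loop over controls by a control mask/value pair (plus a conflict flag for contradictory duplicate controls) computed once before the loop, so each term is tested with a single flat '(state & control_mask) == control_value' comparison.
-- outside the precondition, e.g. on apply_swap({}, 1, 0, 0, [(5, '1')]): A returns {}, B raises ValueError
import Mathlib
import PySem

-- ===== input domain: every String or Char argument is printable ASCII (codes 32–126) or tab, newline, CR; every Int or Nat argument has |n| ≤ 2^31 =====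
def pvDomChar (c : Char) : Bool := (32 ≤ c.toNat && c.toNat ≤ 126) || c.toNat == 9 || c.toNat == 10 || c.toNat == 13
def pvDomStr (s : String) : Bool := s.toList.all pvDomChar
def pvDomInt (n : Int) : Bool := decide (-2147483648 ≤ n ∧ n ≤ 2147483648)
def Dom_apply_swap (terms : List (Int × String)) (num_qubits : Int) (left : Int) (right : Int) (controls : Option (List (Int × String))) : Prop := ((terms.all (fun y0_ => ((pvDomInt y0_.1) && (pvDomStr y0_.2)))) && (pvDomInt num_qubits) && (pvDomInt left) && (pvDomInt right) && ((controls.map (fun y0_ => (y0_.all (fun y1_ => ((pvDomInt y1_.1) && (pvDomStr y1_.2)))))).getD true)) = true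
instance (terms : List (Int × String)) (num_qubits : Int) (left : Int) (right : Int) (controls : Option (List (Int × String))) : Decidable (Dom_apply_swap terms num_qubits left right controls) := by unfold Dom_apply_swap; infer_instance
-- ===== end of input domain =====

-- B replaces A's per-term inner loop over the controls by a mask/value pair (plus a conflict
-- flag for contradictory duplicate controls) computed once; same return value, same key order.

-- ===== PORT A =====
-- exact where 0 ≤ num_qubits - 1 - qubit (guaranteed by Pre_); Python raises ValueError on a negative shift count
def pvBitMask (num_qubits : Int) (qubit : Int) : Int :=
  (1 : Int) <<< (num_qubits - 1 - qubit).toNat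

def pvBitValue (state : Int) (num_qubits : Int) (qubit : Int) : Int :=
  if PySem.Int.band state (pvBitMask num_qubits qubit) ≠ 0 then 1 else 0

def pvControlsMatch (state : Int) (num_qubits : Int) : List (Int × String) → Bool
  | [] => true
  | (qubit, control_state) :: rest =>
      let expected : Int := if control_state = "1" then 1 else 0
      if pvBitValue state num_qubits qubit ≠ expected then false
      else pvControlsMatch state num_qubits rest

def apply_swap (terms : List (Int × String)) (num_qubits : Int) (left : Int) (right : Int) (controls : Option (List (Int × String))) : List (Int × String) :=
  let cs := controls.getD []
  let left_mask := pvBitMask num_qubits left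
  let right_mask := pvBitMask num_qubits right
  (((PySem.Dict.ofList terms).items).foldl
    (fun (result : PySem.Dict Int String) (t : Int × String) =>
      if ¬ (pvControlsMatch t.1 num_qubits cs = true) then result.insert t.1 t.2
      else
        let left_bit : Int := if PySem.Int.band t.1 left_mask ≠ 0 then 1 else 0
        let right_bit : Int := if PySem.Int.band t.1 right_mask ≠ 0 then 1 else 0
        let swapped_state : Int :=
          if left_bit ≠ right_bit then PySem.Int.bxor (PySem.Int.bxor t.1 left_mask) right_mask
          else t.1
        result.insert swapped_state t.2)
    PySem.Dict.empty).items

-- ===== PORT B =====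
-- (control_mask, control_value, conflict) accumulated once over the controls
def pvControlCfg (num_qubits : Int) (cs : List (Int × String)) : Int × Int × Bool :=
  cs.foldl
    (fun (acc : Int × Int × Bool) (p : Int × String) =>
      let m : Int := (1 : Int) <<< (num_qubits - 1 - p.1).toNat
      let v : Int := if p.2 = "1" then m else 0
      (PySem.Int.bor acc.1 m, PySem.Int.bor acc.2.1 v,
       acc.2.2 || (decide (PySem.Int.band acc.1 m ≠ 0) && decide (PySem.Int.band acc.2.1 m ≠ v))))
    (0, 0, false)

def apply_swap_alt (terms : List (Int × String)) (num_qubits : Int) (left : Int) (right : Int) (controls : Option (List (Int × String))) : List (Int × String) :=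
  let left_mask : Int := (1 : Int) <<< (num_qubits - 1 - left).toNat
  let right_mask : Int := (1 : Int) <<< (num_qubits - 1 - right).toNat
  let cfg := pvControlCfg num_qubits (controls.getD [])
  (((PySem.Dict.ofList terms).items).foldl
    (fun (result : PySem.Dict Int String) (t : Int × String) =>
      let new_state : Int :=
        if cfg.2.2 = false ∧ PySem.Int.band t.1 cfg.1 = cfg.2.1 then
          (if (PySem.Int.band t.1 left_mask ≠ 0) ≠ (PySem.Int.band t.1 right_mask ≠ 0) then
             PySem.Int.bxor (PySem.Int.bxor t.1 left_mask) right_mask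
           else t.1)
        else t.1
      result.insert new_state t.2)
    PySem.Dict.empty).items

-- ===== PRECONDITION & SPEC =====
-- Pre_ excludes exactly the inputs with a negative shift count 'num_qubits - 1 - qubit' for the
-- swapped or control qubits: Python's '1 << negative' raises ValueError (A raises there whenever the
-- mask is actually computed; where A happens not to reach it — empty terms, or a control mismatch
-- short-circuiting the scan — B's up-front mask computation raises, so those inputs are excluded too).
def Pre_apply_swap (terms : List (Int × String)) (num_qubits : Int) (left : Int) (right : Int) (controls : Option (List (Int × String))) : Prop :=
  0 ≤ num_qubits - 1 - left ∧ 0 ≤ num_qubits - 1 - right ∧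
    ∀ p ∈ controls.getD [], 0 ≤ num_qubits - 1 - p.1
instance (terms : List (Int × String)) (num_qubits : Int) (left : Int) (right : Int) (controls : Option (List (Int × String))) : Decidable (Pre_apply_swap terms num_qubits left right controls) := by unfold Pre_apply_swap; infer_instance

def pvWitness_apply_swap : (List (Int × String)) × Int × Int × Int × (Option (List (Int × String))) :=
  ([((5 : Int), "x"), ((3 : Int), "y")], 3, 0, 2, some [((1 : Int), "1")])

def Spec_apply_swap (terms : List (Int × String)) (num_qubits : Int) (left : Int) (right : Int) (controls : Option (List (Int × String))) (out : List (Int × String)) : Prop := out = apply_swap_alt terms num_qubits left right controls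
instance (terms : List (Int × String)) (num_qubits : Int) (left : Int) (right : Int) (controls : Option (List (Int × String))) (out : List (Int × String)) : Decidable (Spec_apply_swap terms num_qubits left right controls out) := by unfold Spec_apply_swap; infer_instance

-- ===== CLAIM (what is proved, stated in full; the proofs are below) =====
def Claim_equal_apply_swap : Prop := ∀ (terms : List (Int × String)) (num_qubits : Int) (left : Int) (right : Int) (controls : Option (List (Int × String))), Dom_apply_swap terms num_qubits left right controls → Pre_apply_swap terms num_qubits left right controls → Spec_apply_swap terms num_qubits left right controls (apply_swap terms num_qubits left right controls)

-- ===== LEMMAS AND PROOFS =====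

theorem subMaskXor (x y : Nat) (h : y &&& x = y) : x - y = x ^^^ y := by
  induction x using Nat.strong_induction_on generalizing y with
  | _ x ih =>
    rcases Nat.eq_zero_or_pos x with hx | hx
    · subst hx; simp_all
    · have hdiv : (y/2) &&& (x/2) = y/2 := by rw [← Nat.and_div_two, h]
      have ihd : x/2 - y/2 = x/2 ^^^ y/2 := ih (x/2) (by omega) _ hdiv
      have hYX : y/2 ≤ x/2 := hdiv ▸ Nat.and_le_right
      have hyx : y ≤ x := h ▸ Nat.and_le_right
      have hbit : y % 2 = 1 → x % 2 = 1 := by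
        intro hcc
        have h0 : (y &&& x).testBit 0 = y.testBit 0 := by rw [h]
        rw [Nat.testBit_and] at h0
        have hy : y.testBit 0 = true := by simp [Nat.testBit_zero, hcc]
        simp only [hy, Bool.true_and] at h0
        simpa [Nat.testBit_zero] using h0
      have hxor2 : (x ^^^ y) % 2 = (x + y) % 2 := Nat.xor_mod_two_eq
      have hxordiv : (x ^^^ y) / 2 = x/2 ^^^ y/2 := Nat.xor_div_two
      have hx2 := Nat.div_add_mod (x ^^^ y) 2
      have hb : x % 2 < 2 := Nat.mod_lt _ (by omega)
      have hc : y % 2 < 2 := Nat.mod_lt _ (by omega)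
      omega

theorem ldiffXorAnd (m n : Nat) : m.ldiff n = m ^^^ (m &&& n) := by
  apply Nat.eq_of_testBit_eq; intro i
  simp [Nat.testBit_ldiff, Nat.testBit_xor, Nat.testBit_and]
  cases m.testBit i <;> cases n.testBit i <;> simp

theorem andSubmask (m n : Nat) : (m &&& n) &&& m = m &&& n := by
  apply Nat.eq_of_testBit_eq; intro i
  simp [Nat.testBit_and]
  cases m.testBit i <;> cases n.testBit i <;> simp

theorem subAndLdiff (m n : Nat) : m - (m &&& n) = m.ldiff n := by
  rw [ldiffXorAnd, subMaskXor _ _ (andSubmask m n)]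

theorem negOfNatSub (k : Nat) : -(k : Int) - 1 = Int.negSucc k := by
  simp [Int.negSucc_eq]; omega

theorem pvBandLand (a b : Int) : PySem.Int.band a b = Int.land a b := by
  unfold PySem.Int.band
  match a, b with
  | Int.ofNat m, Int.ofNat n => simp [Int.land]
  | Int.ofNat m, Int.negSucc n => simp [Int.land, subAndLdiff]
  | Int.negSucc m, Int.ofNat n => simp [Int.land, subAndLdiff]
  | Int.negSucc m, Int.negSucc n => simp [Int.land, negOfNatSub]

theorem pvBorLor (a b : Int) : PySem.Int.bor a b = Int.lor a b := by
  unfold PySem.Int.bor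
  match a, b with
  | Int.ofNat m, Int.ofNat n => simp [Int.lor]
  | Int.ofNat m, Int.negSucc n => simp [Int.lor, subAndLdiff, negOfNatSub]
  | Int.negSucc m, Int.ofNat n => simp [Int.lor, subAndLdiff, negOfNatSub]
  | Int.negSucc m, Int.negSucc n => simp [Int.lor, negOfNatSub]

theorem intTestBitExt {a b : Int} (h : ∀ i, a.testBit i = b.testBit i) : a = b := by
  match a, b with
  | Int.ofNat m, Int.ofNat n =>
      simp only [Int.testBit] at h
      exact congrArg Int.ofNat (Nat.eq_of_testBit_eq h)
  | Int.negSucc m, Int.negSucc n =>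
      simp only [Int.testBit] at h
      have h' : ∀ i, m.testBit i = n.testBit i := fun i => by
        have := h i; cases hm : m.testBit i <;> cases hn : n.testBit i <;> simp_all
      exact congrArg Int.negSucc (Nat.eq_of_testBit_eq h')
  | Int.ofNat m, Int.negSucc n =>
      obtain ⟨i, hi1, hi2⟩ : ∃ i, m < 2^i ∧ n < 2^i :=
        ⟨max m n + 1, lt_of_le_of_lt (le_max_left m n) (Nat.lt_two_pow_self.trans_le (Nat.pow_le_pow_right (by omega) (by omega))), lt_of_le_of_lt (le_max_right m n) (Nat.lt_two_pow_self.trans_le (Nat.pow_le_pow_right (by omega) (by omega)))⟩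
      have := h i
      simp [Int.testBit, Nat.testBit_eq_false_of_lt hi1, Nat.testBit_eq_false_of_lt hi2] at this
  | Int.negSucc m, Int.ofNat n =>
      obtain ⟨i, hi1, hi2⟩ : ∃ i, m < 2^i ∧ n < 2^i :=
        ⟨max m n + 1, lt_of_le_of_lt (le_max_left m n) (Nat.lt_two_pow_self.trans_le (Nat.pow_le_pow_right (by omega) (by omega))), lt_of_le_of_lt (le_max_right m n) (Nat.lt_two_pow_self.trans_le (Nat.pow_le_pow_right (by omega) (by omega)))⟩
      have := h i
      simp [Int.testBit, Nat.testBit_eq_false_of_lt hi1, Nat.testBit_eq_false_of_lt hi2] at this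

theorem bandTB (a b : Int) (k : Nat) : (PySem.Int.band a b).testBit k = (a.testBit k && b.testBit k) := by
  rw [pvBandLand]; exact Int.testBit_land a b k

theorem borTB (a b : Int) (k : Nat) : (PySem.Int.bor a b).testBit k = (a.testBit k || b.testBit k) := by
  rw [pvBorLor]; exact Int.testBit_lor a b k

theorem maskTB (e k : Nat) : ((1 : Int) <<< e).testBit k = decide (e = k) := by
  have h1 : ((1 : Int) <<< e) = ((2^e : Nat) : Int) := by simp [Int.shiftLeft_eq]
  rw [h1]
  show Nat.testBit (2^e) k = decide (e = k)
  exact Nat.testBit_two_pow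

theorem zeroTB (k : Nat) : (0 : Int).testBit k = false := by
  show Nat.testBit 0 k = false
  simp

theorem bandEqIff (a b c : Int) : PySem.Int.band a b = c ↔ ∀ k, (a.testBit k && b.testBit k) = c.testBit k := by
  constructor
  · intro h k; rw [← h, bandTB]
  · intro h; exact intTestBitExt (fun k => by rw [bandTB]; exact h k)

theorem bandMaskNeZero (S : Int) (e : Nat) : PySem.Int.band S ((1 : Int) <<< e) ≠ 0 ↔ S.testBit e = true := by
  constructor
  · intro h
    by_contra hS
    apply h
    apply intTestBitExt
    intro k
    rw [bandTB, maskTB, zeroTB]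
    by_cases hk : e = k
    · subst hk; simp_all
    · simp [hk]
  · intro hS h0
    have := congrArg (fun z => z.testBit e) h0
    simp only [bandTB, maskTB, zeroTB, hS, decide_true, Bool.true_and] at this
    simp at this

theorem vTB (c : Bool) (e k : Nat) : (if c = true then ((1 : Int) <<< e) else 0).testBit k = (c && decide (e = k)) := by
  cases c <;> simp [maskTB, zeroTB]

theorem bandMaskEq (X : Int) (e : Nat) (c : Bool) :
    PySem.Int.band X ((1 : Int) <<< e) = (if c = true then ((1 : Int) <<< e) else 0) ↔ X.testBit e = c := by
  rw [bandEqIff]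
  constructor
  · intro h
    have := h e
    rw [maskTB, vTB] at this
    simpa using this
  · intro h k
    rw [maskTB, vTB]
    by_cases hk : e = k
    · subst hk; simp [h]
    · simp [hk]

theorem pointSplit (S M V : Int) (e : Nat) :
    (PySem.Int.band S M = V) ↔ ((∀ k, k ≠ e → (S.testBit k && M.testBit k) = V.testBit k) ∧ (S.testBit e && M.testBit e) = V.testBit e) := by
  rw [bandEqIff]
  constructor
  · exact fun h => ⟨fun k _ => h k, h e⟩
  · rintro ⟨h1, h2⟩ k
    by_cases hk : k = e
    · subst hk; exact h2
    · exact h1 k hk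

theorem newSplit (S cm cv : Int) (e : Nat) (c : Bool) :
    (PySem.Int.band S (PySem.Int.bor cm ((1 : Int) <<< e)) = PySem.Int.bor cv (if c = true then ((1 : Int) <<< e) else 0)) ↔
      ((∀ k, k ≠ e → (S.testBit k && cm.testBit k) = cv.testBit k) ∧ S.testBit e = (cv.testBit e || c)) := by
  rw [pointSplit S _ _ e]
  constructor
  · rintro ⟨h1, h2⟩
    constructor
    · intro k hk
      have := h1 k hk
      rw [borTB, borTB, maskTB, vTB] at this
      simp [Ne.symm hk] at this
      simpa using this
    · rw [borTB, borTB, maskTB, vTB] at h2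
      simpa using h2
  · rintro ⟨h1, h2⟩
    constructor
    · intro k hk
      rw [borTB, borTB, maskTB, vTB]
      have := h1 k hk
      simp [Ne.symm hk]
      simpa using this
    · rw [borTB, borTB, maskTB, vTB]
      simp [h2]

theorem headChar (S num_qubits q : Int) (s : String) :
    decide (pvBitValue S num_qubits q = (if s = "1" then (1:Int) else 0)) =
      (S.testBit ((num_qubits - 1 - q).toNat) == decide (s = "1")) := by
  by_cases hS : S.testBit ((num_qubits - 1 - q).toNat) = true <;>
    by_cases hs : s = "1" <;>
      simp [pvBitValue, pvBitMask, bandMaskNeZero, hS, hs]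

-- the step of B's control-configuration fold (helper for the proofs only)
def pvStep (num_qubits : Int) (acc : Int × Int × Bool) (p : Int × String) : Int × Int × Bool :=
  let m : Int := (1 : Int) <<< (num_qubits - 1 - p.1).toNat
  let v : Int := if p.2 = "1" then m else 0
  (PySem.Int.bor acc.1 m, PySem.Int.bor acc.2.1 v,
   acc.2.2 || (decide (PySem.Int.band acc.1 m ≠ 0) && decide (PySem.Int.band acc.2.1 m ≠ v)))

theorem bandMaskZero (X : Int) (e : Nat) : (PySem.Int.band X ((1 : Int) <<< e) = 0) ↔ X.testBit e = false := by
  constructor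
  · intro h
    by_contra hX
    simp only [Bool.not_eq_false] at hX
    exact ((bandMaskNeZero X e).mpr hX) h
  · intro h
    by_contra hne
    exact absurd ((bandMaskNeZero X e).mp hne) (by simp [h])

theorem stepChar (S num_qubits : Int) (p : Int × String) (cm cv : Int) (cf : Bool)
    (hinv : ∀ k, cv.testBit k = true → cm.testBit k = true) :
    (!(pvStep num_qubits (cm, cv, cf) p).2.2 &&
       decide (PySem.Int.band S (pvStep num_qubits (cm, cv, cf) p).1 = (pvStep num_qubits (cm, cv, cf) p).2.1)) =
      (!cf && decide (PySem.Int.band S cm = cv) &&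
        decide (pvBitValue S num_qubits p.1 = (if p.2 = "1" then (1:Int) else 0))) := by
  set e := (num_qubits - 1 - p.1).toNat with he
  set c := decide (p.2 = "1") with hc
  have hv : (if p.2 = "1" then ((1:Int) <<< e) else 0) = (if c = true then ((1:Int) <<< e) else 0) := by
    by_cases hs : p.2 = "1" <;> simp [hc, hs]
  cases cf with
  | true => simp [pvStep]
  | false =>
    simp only [pvStep, Bool.false_or, Bool.not_false, Bool.true_and]
    rw [headChar, hv]
    rw [Bool.eq_iff_iff]
    simp only [Bool.and_eq_true, Bool.not_eq_true', Bool.and_eq_false_iff, decide_eq_true_eq,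
      decide_eq_false_iff_not, not_not, beq_iff_eq, ← he]
    rw [newSplit, pointSplit S cm cv e, bandMaskZero, bandMaskEq]
    have hVC := hinv e
    constructor
    · rintro ⟨hd, hP, hbit⟩
      refine ⟨⟨hP, ?_⟩, ?_⟩ <;>
        (rcases hd with hd | hd <;>
          cases hC : cm.testBit e <;> cases hV : cv.testBit e <;> cases hc2 : c <;>
            cases hS : S.testBit e <;> simp_all)
    · rintro ⟨⟨hP, hold⟩, hhead⟩
      refine ⟨?_, hP, ?_⟩ <;>
        (cases hC : cm.testBit e <;> cases hV : cv.testBit e <;> cases hc2 : c <;>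
          cases hS : S.testBit e <;> simp_all)

theorem cfgFoldChar (num_qubits S : Int) (cs : List (Int × String)) (cm cv : Int) (cf : Bool)
    (hinv : ∀ k, cv.testBit k = true → cm.testBit k = true) :
    ((!(cs.foldl (pvStep num_qubits) (cm, cv, cf)).2.2 &&
       decide (PySem.Int.band S (cs.foldl (pvStep num_qubits) (cm, cv, cf)).1 =
         (cs.foldl (pvStep num_qubits) (cm, cv, cf)).2.1)) =
      (!cf && decide (PySem.Int.band S cm = cv) && pvControlsMatch S num_qubits cs)) ∧
    (∀ k, (cs.foldl (pvStep num_qubits) (cm, cv, cf)).2.1.testBit k = true →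
      (cs.foldl (pvStep num_qubits) (cm, cv, cf)).1.testBit k = true) := by
  induction cs generalizing cm cv cf with
  | nil => exact ⟨by simp [pvControlsMatch]; rfl, hinv⟩
  | cons p rest ih =>
    obtain ⟨q, s⟩ := p
    have hinv' : ∀ k, (pvStep num_qubits (cm, cv, cf) (q, s)).2.1.testBit k = true →
        (pvStep num_qubits (cm, cv, cf) (q, s)).1.testBit k = true := by
      intro k hk
      simp only [pvStep] at hk ⊢
      rw [borTB] at hk ⊢
      rcases Bool.or_eq_true_iff.mp hk with h | h
      · exact Bool.or_eq_true_iff.mpr (Or.inl (hinv k h))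
      · by_cases hs : s = "1"
        · simp only [hs] at h
          exact Bool.or_eq_true_iff.mpr (Or.inr h)
        · simp [hs, zeroTB] at h
    have hfold : ((q, s) :: rest).foldl (pvStep num_qubits) (cm, cv, cf) =
        rest.foldl (pvStep num_qubits) (pvStep num_qubits (cm, cv, cf) (q, s)) := rfl
    obtain ⟨ih1, ih2⟩ := ih (pvStep num_qubits (cm, cv, cf) (q, s)).1
      (pvStep num_qubits (cm, cv, cf) (q, s)).2.1
      (pvStep num_qubits (cm, cv, cf) (q, s)).2.2 hinv'
    refine ⟨?_, by rw [hfold]; simpa using ih2⟩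
    rw [hfold]
    have ih1' := ih1
    simp only at ih1'
    rw [ih1', stepChar S num_qubits (q, s) cm cv cf hinv]
    by_cases hh : pvBitValue S num_qubits q = (if s = "1" then (1:Int) else 0)
    · simp [pvControlsMatch, hh, Bool.and_assoc]
    · simp [pvControlsMatch, hh]

theorem cfgEqFold (num_qubits : Int) (cs : List (Int × String)) :
    pvControlCfg num_qubits cs = cs.foldl (pvStep num_qubits) (0, 0, false) := rfl

theorem condChar (num_qubits S : Int) (cs : List (Int × String)) :
    decide ((pvControlCfg num_qubits cs).2.2 = false ∧
        PySem.Int.band S (pvControlCfg num_qubits cs).1 = (pvControlCfg num_qubits cs).2.1) =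
      pvControlsMatch S num_qubits cs := by
  rw [cfgEqFold]
  have h0 : ∀ k, (0 : Int).testBit k = true → (0 : Int).testBit k = true := fun _ h => h
  have := (cfgFoldChar num_qubits S cs 0 0 false h0).1
  rw [show PySem.Int.band S 0 = 0 from PySem.Int.band_zero S] at this
  simp only [Bool.not_false, decide_true, Bool.and_true, Bool.true_and] at this
  rw [← this]
  cases hcf : (cs.foldl (pvStep num_qubits) (0, 0, false)).2.2 <;> simp

-- ===== VERDICT (by name: the statement is the Claim_ definition above) =====
theorem apply_swap_spec : Claim_equal_apply_swap := by
  intro terms num_qubits left right controls _ _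
  unfold Spec_apply_swap
  unfold apply_swap apply_swap_alt
  simp only []
  congr 1
  apply PySem.List.foldl_congr_mem
  intro result t _
  rw [← condChar num_qubits t.1 (controls.getD [])]
  by_cases hcond : ((pvControlCfg num_qubits (controls.getD [])).2.2 = false ∧
      PySem.Int.band t.1 (pvControlCfg num_qubits (controls.getD [])).1 =
        (pvControlCfg num_qubits (controls.getD [])).2.1)
  · simp only [pvBitMask]
    by_cases h1 : PySem.Int.band t.1 ((1:Int) <<< (num_qubits - 1 - left).toNat) = 0 <;>
      by_cases h2 : PySem.Int.band t.1 ((1:Int) <<< (num_qubits - 1 - right).toNat) = 0 <;>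
        simp [hcond, h1, h2]
  · simp [hcond]
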